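-- pv_equiv track=rewrite | github.com/dzjxzyd/R-PeptideCutter | R-PeptideCutter_for_two_enzymes.py | Trypsin
-- ===== SOURCE A (Python) =====
-- def Trypsin(seq,seq_len):
--     cleavage=[]
--     for i in range(seq_len):
--         if i < seq_len-1:
--             if seq[i]=='K' or seq[i] =='R':
--                 if seq[i+1] != 'P':
--                     cleavage.append(i)
--         if i < seq_len-2:
--             if seq[i] == 'W':
--                 if seq[i+1] == 'K':
--                     if seq[i+2] =='P':
--                         cleavage.append(i+1)
--         if i < seq_len-2:
--             if seq[i] =='M':
--                 if seq[i+1] == 'R':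
--                     if seq[i+2] =='P':
--                         cleavage.append(i+1)
--         if i < seq_len-2:
--             if seq[i] =='E':
--                 if seq[i+1] == 'R':
--                     if seq[i+2] =='P':
--                         cleavage.append(i+1)
--         #situation will block the cleavage
--         if i < seq_len-2:
--             if seq[i]=='D' or seq[i]=='C':
--                 if seq[i+1] == 'K':
--                     if seq[i+2] == 'D':
--                         if i+1 in cleavage:
--                             cleavage.remove(i+1)
--         if i < seq_len-2:
--             if seq[i]=='C':
--                 if seq[i+1] == 'K':
--                     if seq[i+2] == 'H' or seq[i+2] == 'Y':
--                         if i+1 in cleavage: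
--                             cleavage.remove(i+1)
--         if i < seq_len-2:
--             if seq[i]=='C':
--                 if seq[i+1] == 'R':
--                     if seq[i+2] == 'K':
--                         if i+1 in cleavage:
--                             cleavage.remove(i+1)
--         if i < seq_len-2:
--             if seq[i]=='R':
--                 if seq[i+1] == 'R':
--                     if seq[i+2] == 'H' or seq[i+2] =='R':
--                         if i+1 in cleavage:
--                             cleavage.remove(i+1)
--     return cleavage
-- ===== SOURCE B (Python) =====
-- import re
--
-- def Trypsin(seq, seq_len):
--     s = seq[:max(seq_len, 0)]
--     positions = set()
--     for m in re.finditer(r'[KR](?=[^P])', s):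
--         positions.add(m.start())
--     for m in re.finditer(r'(?:(?<=W)K|(?<=[ME])R)(?=P)', s):
--         positions.add(m.start())
--     return sorted(positions)
-- ===== Notes on version B (the rewrite author's own statement) =====
-- stated objective: faster
-- what changed: B slices the sequence once and collects cleavage positions as regex matches ([KR](?=[^P]) plus one combined lookaround pattern for the W-K-P/M-R-P/E-R-P sites) unioned into a set and sorted, instead of A's char-by-char index loop with eight sequential if-chains and 'i+1 in cleavage'/list.remove blocking rules (which are dead code).
import Mathlib
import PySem

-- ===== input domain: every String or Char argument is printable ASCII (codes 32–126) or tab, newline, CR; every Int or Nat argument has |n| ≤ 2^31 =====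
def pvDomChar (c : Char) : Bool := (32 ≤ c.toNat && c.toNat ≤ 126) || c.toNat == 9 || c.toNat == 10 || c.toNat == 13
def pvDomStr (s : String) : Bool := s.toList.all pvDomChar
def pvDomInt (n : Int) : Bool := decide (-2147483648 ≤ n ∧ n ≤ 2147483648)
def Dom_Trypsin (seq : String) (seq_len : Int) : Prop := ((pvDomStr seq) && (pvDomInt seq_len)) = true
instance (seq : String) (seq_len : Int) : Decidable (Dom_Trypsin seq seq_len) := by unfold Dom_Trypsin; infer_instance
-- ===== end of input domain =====

-- B finds cleavage positions by regex-style single-position matching unioned into a set and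
-- sorted, instead of A's index loop with sequential if-chains and (dead) list.remove blocking rules.

-- ===== PORT A =====
def aGet (seq : String) (i : Int) : Option Char := PySem.Str.pyGet? seq i

def addIf (c : Prop) [Decidable c] (cl : List Int) (v : Int) : List Int :=
  if c then cl ++ [v] else cl
def blockIf (c : Prop) [Decidable c] (cl : List Int) (v : Int) : List Int :=
  if c ∧ v ∈ cl then (PySem.List.remove? cl v).getD cl else cl

def stepA (seq : String) (seq_len : Int) (cl : List Int) (i : Int) : List Int :=
  let cl1 := addIf (i < seq_len - 1 ∧ (aGet seq i = some 'K' ∨ aGet seq i = some 'R') ∧ aGet seq (i+1) ≠ some 'P') cl i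
  let cl2 := addIf (i < seq_len - 2 ∧ aGet seq i = some 'W' ∧ aGet seq (i+1) = some 'K' ∧ aGet seq (i+2) = some 'P') cl1 (i+1)
  let cl3 := addIf (i < seq_len - 2 ∧ aGet seq i = some 'M' ∧ aGet seq (i+1) = some 'R' ∧ aGet seq (i+2) = some 'P') cl2 (i+1)
  let cl4 := addIf (i < seq_len - 2 ∧ aGet seq i = some 'E' ∧ aGet seq (i+1) = some 'R' ∧ aGet seq (i+2) = some 'P') cl3 (i+1)
  let cl5 := blockIf (i < seq_len - 2 ∧ (aGet seq i = some 'D' ∨ aGet seq i = some 'C') ∧ aGet seq (i+1) = some 'K' ∧ aGet seq (i+2) = some 'D') cl4 (i+1)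
  let cl6 := blockIf (i < seq_len - 2 ∧ aGet seq i = some 'C' ∧ aGet seq (i+1) = some 'K' ∧ (aGet seq (i+2) = some 'H' ∨ aGet seq (i+2) = some 'Y')) cl5 (i+1)
  let cl7 := blockIf (i < seq_len - 2 ∧ aGet seq i = some 'C' ∧ aGet seq (i+1) = some 'R' ∧ aGet seq (i+2) = some 'K') cl6 (i+1)
  blockIf (i < seq_len - 2 ∧ aGet seq i = some 'R' ∧ aGet seq (i+1) = some 'R' ∧ (aGet seq (i+2) = some 'H' ∨ aGet seq (i+2) = some 'R')) cl7 (i+1)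

def Trypsin (seq : String) (seq_len : Int) : List Int :=
  (PySem.List.pyRange 0 seq_len 1).foldl (stepA seq seq_len) []

-- ===== PORT B =====
-- regex [KR](?=[^P]) matches (exactly) at position i
def matchPrim (cs : List Char) (i : Nat) : Bool :=
  match cs[i]?, cs[i+1]? with
  | some a, some b => (a == 'K' || a == 'R') && !(b == 'P')
  | _, _ => false

-- regex (?:(?<=W)K|(?<=[ME])R)(?=P) matches (exactly) at position j
def matchSpec (cs : List Char) (j : Nat) : Bool :=
  match j with
  | 0 => false
  | k+1 =>
    match cs[k]?, cs[k+1]?, cs[k+2]? with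
    | some w, some a, some p =>
        ((w == 'W' && a == 'K') || ((w == 'M' || w == 'E') && a == 'R')) && p == 'P'
    | _, _, _ => false

def Trypsin_alt (seq : String) (seq_len : Int) : List Int :=
  let cs := PySem.List.slice seq.toList none (some (max seq_len 0))
  let p1 := ((List.range cs.length).filter (fun i => matchPrim cs i)).map (fun i => (i : Int))
  let p2 := ((List.range cs.length).filter (fun j => matchSpec cs j)).map (fun j => (j : Int))
  PySem.List.sorted (PySem.Set.ofList (p1 ++ p2)) (fun x => x) false

-- ===== PRECONDITION & SPEC =====
-- Pre_ excludes exactly the inputs on which A raises IndexError: seq_len ≥ 2 reaching past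
-- the string, except seq_len = len(seq)+1 with a last character outside {K,R}, where A's
-- guarded accesses all stay in range and A returns normally.
def Pre_Trypsin (seq : String) (seq_len : Int) : Prop :=
  seq_len ≤ (seq.toList.length : Int) ∨ seq_len ≤ 1 ∨
  (seq_len = (seq.toList.length : Int) + 1 ∧
    (seq.toList.getLast?.all (fun c => !(c == 'K') && !(c == 'R'))) = true)
instance (seq : String) (seq_len : Int) : Decidable (Pre_Trypsin seq seq_len) := by unfold Pre_Trypsin; infer_instance
def pvWitness_Trypsin : String × Int := ("MRPKA", 5)
def Spec_Trypsin (seq : String) (seq_len : Int) (out : List Int) : Prop := out = Trypsin_alt seq seq_len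
instance (seq : String) (seq_len : Int) (out : List Int) : Decidable (Spec_Trypsin seq seq_len out) := by unfold Spec_Trypsin; infer_instance

-- ===== CLAIM (what is proved, stated in full; the proofs are below) =====
def Claim_equal_Trypsin : Prop := ∀ (seq : String) (seq_len : Int), Dom_Trypsin seq seq_len → Pre_Trypsin seq seq_len → Spec_Trypsin seq seq_len (Trypsin seq seq_len)

-- ===== LEMMAS AND PROOFS =====

-- the additions A's loop body performs at index i (the blocking rules are dead code)
def contrib (seq : String) (seq_len i : Int) : List Int :=
  (if i < seq_len - 1 ∧ (aGet seq i = some 'K' ∨ aGet seq i = some 'R') ∧ aGet seq (i+1) ≠ some 'P' then [i] else []) ++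
  ((if i < seq_len - 2 ∧ aGet seq i = some 'W' ∧ aGet seq (i+1) = some 'K' ∧ aGet seq (i+2) = some 'P' then [i+1] else []) ++
  ((if i < seq_len - 2 ∧ aGet seq i = some 'M' ∧ aGet seq (i+1) = some 'R' ∧ aGet seq (i+2) = some 'P' then [i+1] else []) ++
  (if i < seq_len - 2 ∧ aGet seq i = some 'E' ∧ aGet seq (i+1) = some 'R' ∧ aGet seq (i+2) = some 'P' then [i+1] else [])))

def bPos (seq : String) (seq_len : Int) : List Int :=
  let cs := PySem.List.slice seq.toList none (some (max seq_len 0))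
  ((List.range cs.length).filter (fun i => matchPrim cs i)).map (fun i => (i : Int)) ++
  ((List.range cs.length).filter (fun j => matchSpec cs j)).map (fun j => (j : Int))

theorem addIf_eq (c : Prop) [Decidable c] (cl : List Int) (v : Int) :
    addIf c cl v = cl ++ (if c then [v] else []) := by
  unfold addIf; split <;> simp

theorem blockIf_id (c : Prop) [Decidable c] (cl : List Int) (v : Int) (hc : c → v ∉ cl) :
    blockIf c cl v = cl := by
  unfold blockIf; rw [if_neg]; rintro ⟨h1, h2⟩; exact hc h1 h2

theorem mem_blockIf (c : Prop) [Decidable c] (cl : List Int) (v x : Int)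
    (hx : x ∈ blockIf c cl v) : x ∈ cl := by
  unfold blockIf at hx
  split at hx
  · rename_i hm
    rw [PySem.List.remove?_eq_some_erase _ _ hm.2] at hx
    exact List.mem_of_mem_erase hx
  · exact hx

theorem notmem_contrib (seq : String) (seq_len : Int) (cl : List Int) (i : Int)
    (h : ∀ x ∈ cl, x < i + 1)
    (hW : aGet seq i ≠ some 'W') (hM : aGet seq i ≠ some 'M') (hE : aGet seq i ≠ some 'E') :
    (i+1) ∉ cl ++ contrib seq seq_len i := by
  unfold contrib
  simp only [List.mem_append, not_or]
  refine ⟨fun hx => by have := h _ hx; omega, ?_, ?_, ?_, ?_⟩ <;>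
    (split_ifs with hcond; · simp_all; try omega
     · simp)

theorem stepA_eq (seq : String) (seq_len : Int) (cl : List Int) (i : Int)
    (h : ∀ x ∈ cl, x < i + 1) :
    stepA seq seq_len cl i = cl ++ contrib seq seq_len i := by
  simp only [stepA, addIf_eq, List.append_assoc]
  change blockIf _ (blockIf _ (blockIf _ (blockIf _ (cl ++ contrib seq seq_len i) (i+1)) (i+1)) (i+1)) (i+1) = _
  rw [blockIf_id _ _ _ (fun hc hm => by
        rcases hc with ⟨-, hc, -⟩
        have hmem := mem_blockIf _ _ _ _ (mem_blockIf _ _ _ _ (mem_blockIf _ _ _ _ hm))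
        exact notmem_contrib seq seq_len cl i h (by simp [hc]) (by simp [hc]) (by simp [hc]) hmem)]
  rw [blockIf_id _ _ _ (fun hc hm => by
        rcases hc with ⟨-, hc, -⟩
        have hmem := mem_blockIf _ _ _ _ (mem_blockIf _ _ _ _ hm)
        exact notmem_contrib seq seq_len cl i h (by simp [hc]) (by simp [hc]) (by simp [hc]) hmem)]
  rw [blockIf_id _ _ _ (fun hc hm => by
        rcases hc with ⟨-, hc, -⟩
        have hmem := mem_blockIf _ _ _ _ hm
        exact notmem_contrib seq seq_len cl i h (by simp [hc]) (by simp [hc]) (by simp [hc]) hmem)]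
  rw [blockIf_id _ _ _ (fun hc hm => by
        rcases hc with ⟨-, hc, -⟩
        rcases hc with hc | hc <;>
          exact notmem_contrib seq seq_len cl i h (by simp [hc]) (by simp [hc]) (by simp [hc]) hm)]

theorem mem_contrib_elim (seq : String) (seq_len i x : Int)
    (hx : x ∈ contrib seq seq_len i) :
    (x = i ∧ aGet seq (i+1) ≠ some 'P') ∨ (x = i + 1 ∧ aGet seq (i+2) = some 'P') := by
  unfold contrib at hx
  simp only [List.mem_append] at hx
  rcases hx with hx | hx | hx | hx <;> (split_ifs at hx <;> simp_all)

theorem contrib_cross (seq : String) (seq_len : Int) (i j x y : Int) (hij : i < j)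
    (hx : x ∈ contrib seq seq_len i) (hy : y ∈ contrib seq seq_len j) : x < y := by
  rcases mem_contrib_elim seq seq_len i x hx with ⟨hx1, hP⟩ | ⟨hx1, hP⟩ <;>
    rcases mem_contrib_elim seq seq_len j y hy with ⟨hy1, hQ⟩ | ⟨hy1, hQ⟩
  · omega
  · omega
  · by_cases hji : i + 1 < j
    · omega
    · exfalso
      have hj : j + 1 = i + 2 := by omega
      rw [hj] at hQ
      exact hQ hP
  · omega

theorem contrib_pairwise (seq : String) (seq_len i : Int) :
    (contrib seq seq_len i).Pairwise (· < ·) := by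
  unfold contrib
  split_ifs <;> simp_all

theorem flat_lt (seq : String) (seq_len m x : Int)
    (hx : x ∈ (PySem.List.pyRange 0 m 1).flatMap (contrib seq seq_len)) : x < m + 1 := by
  simp only [List.mem_flatMap, PySem.List.mem_pyRange_one] at hx
  obtain ⟨i, ⟨h0, h1⟩, hxc⟩ := hx
  rcases mem_contrib_elim seq seq_len i x hxc with ⟨rfl, -⟩ | ⟨rfl, -⟩ <;> omega

theorem loopA (seq : String) (seq_len : Int) (k : Nat) :
    (PySem.List.pyRange 0 (k : Int) 1).foldl (stepA seq seq_len) []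
      = (PySem.List.pyRange 0 (k : Int) 1).flatMap (contrib seq seq_len) := by
  induction k with
  | zero => simp [PySem.List.pyRange_one_eq_nil]
  | succ k ih =>
    have hcast : ((k + 1 : Nat) : Int) = (k : Int) + 1 := by push_cast; ring
    rw [hcast, PySem.List.pyRange_one_succ_right (by positivity),
        List.foldl_append, List.flatMap_append, ih]
    simp only [List.foldl_cons, List.foldl_nil, List.flatMap_cons, List.flatMap_nil, List.append_nil]
    exact stepA_eq seq seq_len _ (k : Int) (fun x hx => flat_lt seq seq_len (k : Int) x hx)

theorem pairwise_flat' (seq : String) (seq_len : Int) (k : Nat) :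
    ((PySem.List.pyRange 0 (k : Int) 1).flatMap (contrib seq seq_len)).Pairwise (· < ·) := by
  induction k with
  | zero => simp [PySem.List.pyRange_one_eq_nil]
  | succ k ih =>
    have hcast : ((k + 1 : Nat) : Int) = (k : Int) + 1 := by push_cast; ring
    rw [hcast, PySem.List.pyRange_one_succ_right (by positivity), List.flatMap_append]
    rw [List.pairwise_append]
    refine ⟨ih, by simpa using contrib_pairwise seq seq_len (k : Int), ?_⟩
    intro x hx y hy
    simp only [List.mem_flatMap, PySem.List.mem_pyRange_one] at hx
    obtain ⟨i, ⟨h0, h1⟩, hxc⟩ := hx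
    simp only [List.flatMap_cons, List.flatMap_nil, List.append_nil] at hy
    exact contrib_cross seq seq_len i (k : Int) x y h1 hxc hy

-- regex-facing definitions (copied here for scratch)

theorem aGet_natCast (seq : String) (k : Nat) : aGet seq (k : Int) = seq.toList[k]? := by
  simp [aGet]

theorem mem_bPos_iff (seq : String) (seq_len x : Int) :
    x ∈ bPos seq seq_len ↔
    ((∃ k : Nat, k < (PySem.List.slice seq.toList none (some (max seq_len 0))).length ∧
        matchPrim (PySem.List.slice seq.toList none (some (max seq_len 0))) k = true ∧ x = (k : Int)) ∨
     (∃ j : Nat, j < (PySem.List.slice seq.toList none (some (max seq_len 0))).length ∧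
        matchSpec (PySem.List.slice seq.toList none (some (max seq_len 0))) j = true ∧ x = (j : Int))) := by
  simp [bPos]
  constructor
  · rintro (⟨a, ⟨h1, h2⟩, h3⟩ | ⟨a, ⟨h1, h2⟩, h3⟩)
    · exact Or.inl ⟨a, h1, h2, h3⟩
    · exact Or.inr ⟨a, h1, h2, h3⟩
  · rintro (⟨a, h1, h2, h3⟩ | ⟨a, h1, h2, h3⟩)
    · exact Or.inl ⟨a, ⟨h1, h2⟩, h3⟩
    · exact Or.inr ⟨a, ⟨h1, h2⟩, h3⟩

theorem mem_flat_iff (seq : String) (seq_len : Int) (hpre : Pre_Trypsin seq seq_len) (x : Int) :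
    x ∈ (PySem.List.pyRange 0 seq_len 1).flatMap (contrib seq seq_len) ↔ x ∈ bPos seq seq_len := by
  unfold Pre_Trypsin at hpre
  have hM : (0 : Int) ≤ max seq_len 0 := le_max_right _ _
  have hcs : PySem.List.slice seq.toList none (some (max seq_len 0))
      = seq.toList.take (max seq_len 0).toNat := PySem.List.slice_to _ hM
  set mN := (max seq_len 0).toNat with hmN
  have hmN' : (mN : Int) = max seq_len 0 := Int.toNat_of_nonneg hM
  have hcslen : (seq.toList.take mN).length = min mN seq.toList.length := by simp
  have hle : seq_len ≤ (mN : Int) := by rw [hmN']; exact le_max_left _ _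
  have hge : (mN : Int) ≤ seq_len ∨ mN = 0 := by
    by_cases h : 0 ≤ seq_len
    · left; rw [hmN', max_eq_left h]
    · right; rw [hmN, max_eq_right (by omega : seq_len ≤ 0)]; simp

  have hget : ∀ (k : Nat), k < mN → (seq.toList.take mN)[k]? = seq.toList[k]? := fun k hk => List.getElem?_take_of_lt hk
  have hA : ∀ (k : Nat), aGet seq (k : Int) = seq.toList[k]? := fun k => aGet_natCast seq k
  have hA1 : ∀ (k : Nat), aGet seq ((k : Int) + 1) = seq.toList[k+1]? := by
    intro k; have : ((k : Int) + 1) = ((k + 1 : Nat) : Int) := by push_cast; ring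
    rw [this]; exact aGet_natCast seq (k+1)
  have hA2 : ∀ (k : Nat), aGet seq ((k : Int) + 2) = seq.toList[k+2]? := by
    intro k; have : ((k : Int) + 2) = ((k + 2 : Nat) : Int) := by push_cast; ring
    rw [this]; exact aGet_natCast seq (k+2)
  rw [mem_bPos_iff seq seq_len x]
  simp only [hcs]
  constructor
  · intro hx
    simp only [List.mem_flatMap, PySem.List.mem_pyRange_one] at hx
    obtain ⟨i, ⟨h0, h2⟩, hc⟩ := hx
    obtain ⟨k, rfl⟩ : ∃ k : Nat, (k : Int) = i := ⟨i.toNat, Int.toNat_of_nonneg h0⟩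
    unfold contrib at hc
    simp only [List.mem_append] at hc
    rcases hc with hc | hc | hc | hc
    · -- primary K/R rule
      split_ifs at hc with hcond
      · obtain ⟨hlt, hKR, hP⟩ := hcond
        simp only [List.mem_singleton] at hc
        -- the character at k
        have hka : ∃ a, seq.toList[k]? = some a ∧ (a = 'K' ∨ a = 'R') := by
          rcases hKR with hk1 | hk1 <;> rw [hA k] at hk1 <;> exact ⟨_, hk1, by simp⟩
        obtain ⟨a, hLa, haKR⟩ := hka
        have hkn : k < seq.toList.length := (List.getElem?_eq_some_iff.mp hLa).choose
        -- the character at k+1 exists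
        have hk1n : k + 1 < seq.toList.length := by
          rcases hpre with hp | hp | ⟨hp, hlast⟩
          · omega
          · omega
          · by_cases hke : k + 1 < seq.toList.length
            · exact hke
            · exfalso
              have hkeq : k = seq.toList.length - 1 := by omega
              have : seq.toList.getLast? = some a := by
                rw [List.getLast?_eq_getElem?, ← hkeq]; exact hLa
              rw [this] at hlast
              simp only [Option.all_some] at hlast
              rcases haKR with rfl | rfl <;> simp at hlast
        have hk1m : k + 1 < mN := by omega
        refine Or.inl ⟨k, ?_, ?_, hc⟩
        · omega
        · have hb : seq.toList[k+1]? = some seq.toList[k+1] := List.getElem?_eq_getElem hk1n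
          have hbP : seq.toList[k+1] ≠ 'P' := by
            intro hbp; apply hP; rw [hA1 k, hb, hbp]
          simp only [matchPrim, hget k (by omega), hget (k+1) hk1m, hLa, hb]
          rcases haKR with rfl | rfl <;> simp [hbP]
      · exact absurd hc (by simp)
    · -- W K P rule
      split_ifs at hc with hcond
      · obtain ⟨hlt, hW, hK, hPp⟩ := hcond
        simp only [List.mem_singleton] at hc
        rw [hA k] at hW; rw [hA1 k] at hK; rw [hA2 k] at hPp
        have h0n : k < seq.toList.length := (List.getElem?_eq_some_iff.mp hW).choose
        have h1n : k + 1 < seq.toList.length := (List.getElem?_eq_some_iff.mp hK).choose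
        have h2n : k + 2 < seq.toList.length := (List.getElem?_eq_some_iff.mp hPp).choose
        have h2m : k + 2 < mN := by omega
        refine Or.inr ⟨k + 1, by omega, ?_, by push_cast; omega⟩
        simp [matchSpec, hget k (by omega), hget (k+1) (by omega), hget (k+2) h2m, hW, hK, hPp]
      · exact absurd hc (by simp)
    · -- M R P rule
      split_ifs at hc with hcond
      · obtain ⟨hlt, hW, hK, hPp⟩ := hcond
        simp only [List.mem_singleton] at hc
        rw [hA k] at hW; rw [hA1 k] at hK; rw [hA2 k] at hPp
        have h0n : k < seq.toList.length := (List.getElem?_eq_some_iff.mp hW).choose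
        have h1n : k + 1 < seq.toList.length := (List.getElem?_eq_some_iff.mp hK).choose
        have h2n : k + 2 < seq.toList.length := (List.getElem?_eq_some_iff.mp hPp).choose
        have h2m : k + 2 < mN := by omega
        refine Or.inr ⟨k + 1, by omega, ?_, by push_cast; omega⟩
        simp [matchSpec, hget k (by omega), hget (k+1) (by omega), hget (k+2) h2m, hW, hK, hPp]
      · exact absurd hc (by simp)
    · -- E R P rule
      split_ifs at hc with hcond
      · obtain ⟨hlt, hW, hK, hPp⟩ := hcond
        simp only [List.mem_singleton] at hc
        rw [hA k] at hW; rw [hA1 k] at hK; rw [hA2 k] at hPp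
        have h0n : k < seq.toList.length := (List.getElem?_eq_some_iff.mp hW).choose
        have h1n : k + 1 < seq.toList.length := (List.getElem?_eq_some_iff.mp hK).choose
        have h2n : k + 2 < seq.toList.length := (List.getElem?_eq_some_iff.mp hPp).choose
        have h2m : k + 2 < mN := by omega
        refine Or.inr ⟨k + 1, by omega, ?_, by push_cast; omega⟩
        simp [matchSpec, hget k (by omega), hget (k+1) (by omega), hget (k+2) h2m, hW, hK, hPp]
      · exact absurd hc (by simp)
  · intro hx
    simp only [List.mem_flatMap, PySem.List.mem_pyRange_one]
    rcases hx with ⟨k, hk, hm, hxk⟩ | ⟨j, hj, hm, hxj⟩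
    · -- primary match
      rw [hcslen] at hk
      have hk1 : k < mN := by omega
      rcases h1 : (seq.toList.take mN)[k]? with _ | a <;> rcases h2 : (seq.toList.take mN)[k+1]? with _ | b <;>
        simp only [matchPrim, h1, h2] at hm
      · exact absurd hm (by simp)
      · exact absurd hm (by simp)
      · exact absurd hm (by simp)
      simp only [Bool.and_eq_true, Bool.or_eq_true, beq_iff_eq, Bool.not_eq_true', beq_eq_false_iff_ne] at hm
      obtain ⟨haKR, hbP⟩ := hm
      have hk2 : k + 1 < (seq.toList.take mN).length := (List.getElem?_eq_some_iff.mp h2).choose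
      have hk2m : k + 1 < mN := by rw [hcslen] at hk2; omega
      have h2' : seq.toList[k+1]? = some b := by rw [← hget (k+1) hk2m]; exact h2
      have h1' : seq.toList[k]? = some a := by rw [← hget k hk1]; exact h1
      have hsl : (k : Int) + 1 < seq_len := by rcases hge with h | h <;> omega
      refine ⟨(k : Int), ⟨by positivity, by omega⟩, ?_⟩
      rw [hxk]
      unfold contrib
      simp only [List.mem_append]
      refine Or.inl ?_
      have hc2 : aGet seq (k : Int) = some 'K' ∨ aGet seq (k : Int) = some 'R' := by
        rw [hA k, h1']; rcases haKR with rfl | rfl <;> simp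
      have hc3 : aGet seq ((k : Int)+1) ≠ some 'P' := by rw [hA1 k, h2']; simp [hbP]
      rw [if_pos ⟨by omega, hc2, hc3⟩]
      simp
    · -- special match
      rcases j with _ | j
      · exact absurd hm (by simp [matchSpec])
      rcases h1 : (seq.toList.take mN)[j]? with _ | w
      · simp [matchSpec, h1] at hm
      rcases h2 : (seq.toList.take mN)[j+1]? with _ | a
      · simp [matchSpec, h1, h2] at hm
      rcases h3 : (seq.toList.take mN)[j+2]? with _ | p
      · simp [matchSpec, h1, h2, h3] at hm
      simp only [matchSpec, h1, h2, h3, Bool.and_eq_true, Bool.or_eq_true, beq_iff_eq] at hm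
      obtain ⟨hwa, hp⟩ := hm
      subst hp
      have hj3 : j + 2 < (seq.toList.take mN).length := by
        have := List.getElem?_eq_some_iff.mp h3
        exact this.choose
      have hj3m : j + 2 < mN := by rw [hcslen] at hj3; omega
      have hj3n : j + 2 < seq.toList.length := by rw [hcslen] at hj3; omega
      have h1' : seq.toList[j]? = some w := by rw [← hget j (by omega)]; exact h1
      have h2' : seq.toList[j+1]? = some a := by rw [← hget (j+1) (by omega)]; exact h2
      have h3' : seq.toList[j+2]? = some 'P' := by rw [← hget (j+2) hj3m]; exact h3
      have hsl : (j : Int) + 2 < seq_len := by rcases hge with h | h <;> omega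
      refine ⟨(j : Int), ⟨by positivity, by omega⟩, ?_⟩
      have hxj' : x = (j : Int) + 1 := by push_cast at hxj; omega
      rw [hxj']
      unfold contrib
      simp only [List.mem_append]
      rcases hwa with ⟨hw, ha⟩ | ⟨hw, ha⟩
      · refine Or.inr (Or.inl ?_)
        have hc2 : aGet seq (j : Int) = some 'W' := by rw [hA j, h1', hw]
        have hc3 : aGet seq ((j : Int)+1) = some 'K' := by rw [hA1 j, h2', ha]
        have hc4 : aGet seq ((j : Int)+2) = some 'P' := by rw [hA2 j, h3']
        rw [if_pos ⟨by omega, hc2, hc3, hc4⟩]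
        simp
      · rcases hw with rfl | rfl
        · refine Or.inr (Or.inr (Or.inl ?_))
          have hc2 : aGet seq (j : Int) = some 'M' := by rw [hA j, h1']
          have hc3 : aGet seq ((j : Int)+1) = some 'R' := by rw [hA1 j, h2', ha]
          have hc4 : aGet seq ((j : Int)+2) = some 'P' := by rw [hA2 j, h3']
          rw [if_pos ⟨by omega, hc2, hc3, hc4⟩]
          simp
        · refine Or.inr (Or.inr (Or.inr ?_))
          have hc2 : aGet seq (j : Int) = some 'E' := by rw [hA j, h1']
          have hc3 : aGet seq ((j : Int)+1) = some 'R' := by rw [hA1 j, h2', ha]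
          have hc4 : aGet seq ((j : Int)+2) = some 'P' := by rw [hA2 j, h3']
          rw [if_pos ⟨by omega, hc2, hc3, hc4⟩]
          simp

theorem bPos_def (seq : String) (seq_len : Int) :
    Trypsin_alt seq seq_len = PySem.List.sorted (PySem.Set.ofList (bPos seq seq_len)) (fun x => x) false := rfl

theorem Trypsin_eq_flatMap (seq : String) (seq_len : Int) :
    Trypsin seq seq_len = (PySem.List.pyRange 0 seq_len 1).flatMap (contrib seq seq_len) := by
  unfold Trypsin
  by_cases h : 0 ≤ seq_len
  · obtain ⟨k, rfl⟩ : ∃ k : Nat, (k : Int) = seq_len := ⟨seq_len.toNat, Int.toNat_of_nonneg h⟩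
    exact loopA seq _ k
  · rw [PySem.List.pyRange_one_eq_nil (by omega)]; simp

theorem pairwise_flat (seq : String) (seq_len : Int) :
    ((PySem.List.pyRange 0 seq_len 1).flatMap (contrib seq seq_len)).Pairwise (· < ·) := by
  by_cases h : 0 ≤ seq_len
  · obtain ⟨k, rfl⟩ : ∃ k : Nat, (k : Int) = seq_len := ⟨seq_len.toNat, Int.toNat_of_nonneg h⟩
    exact pairwise_flat' seq _ k
  · rw [PySem.List.pyRange_one_eq_nil (by omega)]; simp

-- ===== VERDICT (by name: the statement is the Claim_ definition above) =====
theorem Trypsin_spec : Claim_equal_Trypsin := by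
  intro seq seq_len _ hpre
  unfold Spec_Trypsin
  rw [Trypsin_eq_flatMap, bPos_def]
  refine Eq.symm (PySem.List.sorted_eq_of_perm_of_pairwise_lt _ _ _ ?_ ?_)
  · refine (List.perm_ext_iff_of_nodup ?_ ?_).mpr ?_
    · exact List.Pairwise.imp (fun h => ne_of_lt h) (pairwise_flat seq seq_len)
    · exact PySem.Set.nodup_ofList _
    · intro a
      rw [PySem.Set.mem_ofList]
      exact mem_flat_iff seq seq_len hpre a
  · exact pairwise_flat seq seq_len
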